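-- pv_equiv track=rewrite | github.com/13alvone/speakQuery | lexers/archive/03-31-2024_old_tradeQuery/CustomTradeQueryListener5.py | process_table_cmd
-- ===== SOURCE A (Python) =====
-- def process_table_cmd(input_list):
--     """
--     Process the list by removing any leading entries equal to "" or "=",
--     and then return all entries up to the end or an entry equal to "\n".
--
--     :param input_list: List of strings to be processed.
--     :return: A list of strings after processing.
--     """
--     # Step 1: Remove leading entries equal to "" or "="
--     input_list = [str(x) for x in input_list]
--     while input_list and (input_list[0] == "" or input_list[0] == "\n"):
--         input_list.pop(0)
--
--     # Step 2: Return entries up to "\n"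
--     processed_list = []
--     for entry in input_list:
--         if entry == "\n":
--             break
--         processed_list.append(entry)
--
--     return processed_list
-- ===== SOURCE B (Python) =====
-- def process_table_cmd(input_list):
--     # Single pass with a state flag: skip leading ""/"\n" until content starts,
--     # then collect entries, stopping at the first "\n".
--     result = []
--     started = False
--     for x in input_list:
--         s = str(x)
--         if not started and (s == "" or s == "\n"):
--             continue
--         if s == "\n":
--             break
--         started = True
--         result.append(s)
--     return result
-- ===== Notes on version B (the rewrite author's own statement) =====
-- stated objective: alternative
-- what changed: Replaces A's two staged passes (a pop(0) trim loop, then an append-until-break loop over the remainder) with one single-pass loop over the original list driven by a 'started' state flag.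
import Mathlib
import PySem

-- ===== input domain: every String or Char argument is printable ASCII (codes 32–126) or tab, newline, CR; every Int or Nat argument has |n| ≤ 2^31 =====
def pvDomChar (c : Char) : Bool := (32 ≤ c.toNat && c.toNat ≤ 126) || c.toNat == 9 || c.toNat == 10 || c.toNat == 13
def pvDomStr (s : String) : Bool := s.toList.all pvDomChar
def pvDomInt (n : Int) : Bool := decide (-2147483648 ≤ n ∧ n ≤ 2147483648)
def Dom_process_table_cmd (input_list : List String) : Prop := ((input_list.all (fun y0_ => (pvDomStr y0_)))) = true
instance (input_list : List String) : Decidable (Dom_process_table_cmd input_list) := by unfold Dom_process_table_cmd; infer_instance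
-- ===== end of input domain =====

-- B replaces A's two staged loops with one single-pass loop and a 'started' flag (alternative decomposition, same cost asymptotically better than pop(0)).

-- ===== PORT A =====
-- str(x) on a string is the identity; the comprehension is a map of the identity.
def pvStrA (x : String) : String := x

-- the while-pop(0) loop of Step 1
def pvTrimA : List String → List String
  | [] => []
  | x :: xs => if x = "" ∨ x = "\n" then pvTrimA xs else x :: xs

-- the for-loop with break of Step 2
def pvCollectA : List String → List String
  | [] => []
  | x :: xs => if x = "\n" then [] else x :: pvCollectA xs

def process_table_cmd (input_list : List String) : List String :=
  pvCollectA (pvTrimA (input_list.map pvStrA))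

-- ===== PORT B =====
-- the single for-loop of Source B with its 'started' flag; continue/break become the three branches
def pvGoB (started : Bool) : List String → List String
  | [] => []
  | x :: xs =>
    let s := x  -- str(x) on a string is the identity
    if started = false ∧ (s = "" ∨ s = "\n") then pvGoB started xs
    else if s = "\n" then []
    else s :: pvGoB true xs

def process_table_cmd_alt (input_list : List String) : List String :=
  pvGoB false input_list

-- ===== PRECONDITION & SPEC =====
def Spec_process_table_cmd (input_list : List String) (out : List String) : Prop := out = process_table_cmd_alt input_list
instance (input_list : List String) (out : List String) : Decidable (Spec_process_table_cmd input_list out) := by unfold Spec_process_table_cmd; infer_instance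

-- ===== CLAIM (what is proved, stated in full; the proofs are below) =====
def Claim_equal_process_table_cmd : Prop := ∀ (input_list : List String), Dom_process_table_cmd input_list → Spec_process_table_cmd input_list (process_table_cmd input_list)

-- ===== LEMMAS AND PROOFS =====
theorem pvGoB_true_eq_collect (l : List String) : pvGoB true l = pvCollectA l := by
  induction l with
  | nil => rfl
  | cons x xs ih =>
    simp only [pvGoB, pvCollectA]
    by_cases h : x = "\n" <;> simp [h, ih]

theorem pvGoB_false_eq (l : List String) : pvGoB false l = pvCollectA (pvTrimA l) := by
  induction l with
  | nil => rfl
  | cons x xs ih =>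
    simp only [pvGoB, pvTrimA]
    by_cases h : x = "" ∨ x = "\n"
    · simp [h, ih]
    · rw [not_or] at h
      rw [if_neg (by simp [h.1, h.2]), if_neg h.2, pvGoB_true_eq_collect,
        if_neg (not_or.mpr h), pvCollectA, if_neg h.2]

-- ===== VERDICT (by name: the statement is the Claim_ definition above) =====
theorem process_table_cmd_spec : Claim_equal_process_table_cmd := by
  intro l _
  unfold Spec_process_table_cmd process_table_cmd process_table_cmd_alt pvStrA
  rw [pvGoB_false_eq]
  simp
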